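-- pv_equiv track=rewrite | github.com/TechmatesTeam/koroh | api/ai_chat/services.py | _extract_user_insights
-- ===== SOURCE A (Python) =====
-- from typing import Dict, Any, List, Optional, Tuple
--
-- def _extract_user_insights(user_message: str, ai_response: str) -> List[Dict[str, str]]:
--     """Extract key insights about the user from the conversation."""
--     insights = []
--     message_lower = user_message.lower()
--
--     # Experience level insights
--     if any(phrase in message_lower for phrase in ['new to', 'beginner', 'just started', 'no experience']):
--         insights.append({'text': 'User is a beginner in their field', 'category': 'experience_level'})
--     elif any(phrase in message_lower for phrase in ['experienced', 'senior', 'years of experience', 'expert']):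
--         insights.append({'text': 'User has significant experience', 'category': 'experience_level'})
--
--     # Career stage insights
--     if any(phrase in message_lower for phrase in ['recent graduate', 'just graduated', 'fresh out of']):
--         insights.append({'text': 'User is a recent graduate', 'category': 'career_stage'})
--     elif any(phrase in message_lower for phrase in ['career change', 'switching careers', 'new field']):
--         insights.append({'text': 'User is considering a career change', 'category': 'career_stage'})
--
--     # Motivation insights
--     if any(phrase in message_lower for phrase in ['passionate about', 'love', 'enjoy', 'excited']):
--         insights.append({'text': 'User shows passion for their field', 'category': 'motivation'})
--     elif any(phrase in message_lower for phrase in ['burned out', 'tired', 'stressed', 'overwhelmed']):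
--         insights.append({'text': 'User may be experiencing burnout', 'category': 'motivation'})
--
--     return insights
-- ===== SOURCE B (Python) =====
-- OPTIONS = [
--     (('new to', 'beginner', 'just started', 'no experience'),
--      'experience_level', 'User is a beginner in their field'),
--     (('experienced', 'senior', 'years of experience', 'expert'),
--      'experience_level', 'User has significant experience'),
--     (('recent graduate', 'just graduated', 'fresh out of'),
--      'career_stage', 'User is a recent graduate'),
--     (('career change', 'switching careers', 'new field'),
--      'career_stage', 'User is considering a career change'),
--     (('passionate about', 'love', 'enjoy', 'excited'),
--      'motivation', 'User shows passion for their field'),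
--     (('burned out', 'tired', 'stressed', 'overwhelmed'),
--      'motivation', 'User may be experiencing burnout'),
-- ]
--
--
-- def _extract_user_insights(user_message: str, ai_response: str):
--     """Extract key insights about the user from the conversation."""
--     message_lower = user_message.lower()
--     # pass 1: collect every matching option
--     matched = [(category, text) for phrases, category, text in OPTIONS
--                if any(p in message_lower for p in phrases)]
--     # pass 2: keep the first match per category
--     seen = set()
--     insights = []
--     for category, text in matched:
--         if category not in seen:
--             seen.add(category)
--             insights.append({'text': text, 'category': category})
--     return insights
-- ===== Notes on version B (the rewrite author's own statement) =====
-- stated objective: simpler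
-- what changed: Replaced the if/elif branch chain with two staged passes over a flat option table: a filter pass collecting every matching option, then a dedupe-by-category pass keeping the first match per category.
import Mathlib
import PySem

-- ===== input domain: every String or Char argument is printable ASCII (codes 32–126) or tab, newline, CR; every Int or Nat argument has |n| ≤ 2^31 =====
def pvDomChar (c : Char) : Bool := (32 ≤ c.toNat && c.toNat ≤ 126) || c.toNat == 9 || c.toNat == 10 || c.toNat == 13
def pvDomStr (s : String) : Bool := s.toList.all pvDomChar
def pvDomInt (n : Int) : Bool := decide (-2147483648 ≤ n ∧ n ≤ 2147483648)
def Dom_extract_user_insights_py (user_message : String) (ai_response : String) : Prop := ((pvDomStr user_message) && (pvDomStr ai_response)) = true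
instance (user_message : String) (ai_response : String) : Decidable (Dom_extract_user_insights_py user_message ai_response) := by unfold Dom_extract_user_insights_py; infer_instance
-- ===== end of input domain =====

-- B replaces the if/elif branch chain with two staged passes over a flat option table:
-- a filter pass collecting every matching option, then a dedupe-by-category pass
-- keeping the first match per category (simpler, same behaviour).

-- ===== PORT A =====
def extract_user_insights_py (user_message : String) (ai_response : String) : List (List (String × String)) :=
  let insights : List (List (String × String)) := []
  let message_lower := PySem.Str.lower user_message
  -- Experience level insights
  let insights :=
    if ["new to", "beginner", "just started", "no experience"].any (fun phrase => PySem.Str.isIn phrase message_lower) then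
      insights ++ [[("text", "User is a beginner in their field"), ("category", "experience_level")]]
    else if ["experienced", "senior", "years of experience", "expert"].any (fun phrase => PySem.Str.isIn phrase message_lower) then
      insights ++ [[("text", "User has significant experience"), ("category", "experience_level")]]
    else insights
  -- Career stage insights
  let insights :=
    if ["recent graduate", "just graduated", "fresh out of"].any (fun phrase => PySem.Str.isIn phrase message_lower) then
      insights ++ [[("text", "User is a recent graduate"), ("category", "career_stage")]]
    else if ["career change", "switching careers", "new field"].any (fun phrase => PySem.Str.isIn phrase message_lower) then
      insights ++ [[("text", "User is considering a career change"), ("category", "career_stage")]]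
    else insights
  -- Motivation insights
  let insights :=
    if ["passionate about", "love", "enjoy", "excited"].any (fun phrase => PySem.Str.isIn phrase message_lower) then
      insights ++ [[("text", "User shows passion for their field"), ("category", "motivation")]]
    else if ["burned out", "tired", "stressed", "overwhelmed"].any (fun phrase => PySem.Str.isIn phrase message_lower) then
      insights ++ [[("text", "User may be experiencing burnout"), ("category", "motivation")]]
    else insights
  insights

-- ===== PORT B =====
-- flat option table: (phrases, category, text)
def pvOptions : List (List String × String × String) :=
  [ (["new to", "beginner", "just started", "no experience"],
     "experience_level", "User is a beginner in their field"),
    (["experienced", "senior", "years of experience", "expert"],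
     "experience_level", "User has significant experience"),
    (["recent graduate", "just graduated", "fresh out of"],
     "career_stage", "User is a recent graduate"),
    (["career change", "switching careers", "new field"],
     "career_stage", "User is considering a career change"),
    (["passionate about", "love", "enjoy", "excited"],
     "motivation", "User shows passion for their field"),
    (["burned out", "tired", "stressed", "overwhelmed"],
     "motivation", "User may be experiencing burnout") ]

def extract_user_insights_py_alt (user_message : String) (ai_response : String) : List (List (String × String)) :=
  let message_lower := PySem.Str.lower user_message
  -- pass 1: collect every matching option
  let matched : List (String × String) :=
    (pvOptions.filter (fun o => o.1.any (fun p => PySem.Str.isIn p message_lower))).map (fun o => o.2)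
  -- pass 2: keep the first match per category
  (matched.foldl
    (fun (acc : PySem.Set String × List (List (String × String))) m =>
      if PySem.Set.contains acc.1 m.1 then acc
      else (PySem.Set.add acc.1 m.1, acc.2 ++ [[("text", m.2), ("category", m.1)]]))
    (PySem.Set.empty, [])).2

-- ===== PRECONDITION & SPEC =====
def Spec_extract_user_insights_py (user_message : String) (ai_response : String) (out : List (List (String × String))) : Prop := out = extract_user_insights_py_alt user_message ai_response
instance (user_message : String) (ai_response : String) (out : List (List (String × String))) : Decidable (Spec_extract_user_insights_py user_message ai_response out) := by unfold Spec_extract_user_insights_py; infer_instance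

-- ===== CLAIM (what is proved, stated in full; the proofs are below) =====
def Claim_equal_extract_user_insights_py : Prop := ∀ (user_message : String) (ai_response : String), Dom_extract_user_insights_py user_message ai_response → Spec_extract_user_insights_py user_message ai_response (extract_user_insights_py user_message ai_response)

-- ===== LEMMAS AND PROOFS =====

-- ===== VERDICT (by name: the statement is the Claim_ definition above) =====
theorem extract_user_insights_py_spec : Claim_equal_extract_user_insights_py := by
  intro u a _
  unfold Spec_extract_user_insights_py extract_user_insights_py extract_user_insights_py_alt
  simp only [pvOptions, List.filter_cons, List.filter_nil]
  split_ifs <;> rfl
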